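-- pv_equiv track=rewrite | github.com/lokeshrevathi/loki-util | python/adjecent_times.py | adjacentTimes
-- ===== SOURCE A (Python) =====
-- def adjacentTimes(s: str) -> str:
--     n = len(s)
--     c = ''
--     op = ''
--     i = 0
--     while i < n:
--         if ord(s[i]) < 48 or 57 < ord(s[i]):
--             c = s[i]
--             i += 1
--             continue
--         num = 0
--         while i < n and 48 <= ord(s[i]) and ord(s[i]) <= 57:
--             num = num * 10 + int(s[i])
--             i += 1
--         else:
--             op = op + (str(c) * num)
--     return op
-- ===== SOURCE B (Python) =====
-- import re
--
-- _RUN = re.compile(r'([^0-9])([0-9]+)')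
--
-- def adjacentTimes(s: str) -> str:
--     return ''.join(m.group(1) * int(m.group(2)) for m in _RUN.finditer(s))
-- ===== Notes on version B (the rewrite author's own statement) =====
-- stated objective: idiomatic
-- what changed: Replaces the hand-written index/while scanning loop with state variables by a single regex finditer over non-digit+digit-run matches joined into the output.
import Mathlib
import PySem

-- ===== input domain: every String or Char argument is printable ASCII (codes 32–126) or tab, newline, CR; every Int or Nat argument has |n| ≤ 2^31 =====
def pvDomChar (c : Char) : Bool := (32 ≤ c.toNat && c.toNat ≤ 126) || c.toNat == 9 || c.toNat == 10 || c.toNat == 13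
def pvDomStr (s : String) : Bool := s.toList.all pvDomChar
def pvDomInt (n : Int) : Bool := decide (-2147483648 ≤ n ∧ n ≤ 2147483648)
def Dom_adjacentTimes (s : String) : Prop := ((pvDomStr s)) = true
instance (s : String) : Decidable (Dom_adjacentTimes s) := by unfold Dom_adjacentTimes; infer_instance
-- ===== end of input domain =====

-- B replaces A's index/while scanning loop by a regex finditer over non-digit+digit-run matches (idiomatic).

-- ===== PORT A =====

-- Python 'c * num' for a string c and int num (empty for num ≤ 0)
def pvStrTimes (c : List Char) (num : Int) : List Char :=
  (List.replicate num.toNat c).flatten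

-- inner 'while i < n and 48 <= ord(s[i]) and ord(s[i]) <= 57' loop of A:
-- accumulates num = num*10 + int(s[i]) and returns the remaining characters
def pvParseA : List Char → Int → Int × List Char
  | [], num => (num, [])
  | ch :: rest, num =>
    if 48 ≤ ch.toNat ∧ ch.toNat ≤ 57 then
      pvParseA rest (num * 10 + ((ch.toNat : Int) - 48))
    else (num, ch :: rest)

theorem pvParseA_len : ∀ (l : List Char) (n : Int), (pvParseA l n).2.length ≤ l.length := by
  intro l
  induction l with
  | nil => intro n; simp [pvParseA]
  | cons ch rest ih =>
    intro n
    simp only [pvParseA]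
    split
    · exact le_trans (ih _) (Nat.le_succ _)
    · simp

-- outer 'while i < n' loop of A, state (c, op); the first digit of a run is
-- folded into pvParseA's start value exactly as A's inner while does on its first pass
def pvLoopA : List Char → List Char → List Char → List Char
  | [], _c, op => op
  | ch :: rest, c, op =>
    if ch.toNat < 48 ∨ 57 < ch.toNat then
      pvLoopA rest [ch] op
    else
      let r := pvParseA rest ((ch.toNat : Int) - 48)
      pvLoopA r.2 c (op ++ pvStrTimes c r.1)
termination_by l => l.length
decreasing_by
  · exact Nat.lt_succ_self _
  · exact Nat.lt_succ_of_le (pvParseA_len rest _)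

def adjacentTimes (s : String) : String := String.mk (pvLoopA s.toList [] [])

-- ===== PORT B =====

-- regex class [0-9]
def pvIsDig (ch : Char) : Bool := 48 ≤ ch.toNat && ch.toNat ≤ 57

-- int(digit string)
def pvDigVal (l : List Char) : Int :=
  l.foldl (fun a d => a * 10 + ((d.toNat : Int) - 48)) 0

-- hand port of re.finditer(r'([^0-9])([0-9]+)', s) with ''.join of group(1)*int(group(2)):
-- exact, since the pattern's leftmost non-overlapping matches are precisely a non-digit
-- char followed by a maximal digit run, scanned left to right
def pvGoB : List Char → List Char
  | [] => []
  | a :: rest =>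
    if (!pvIsDig a) && (match rest.head? with | some b => pvIsDig b | none => false) then
      pvStrTimes [a] (pvDigVal (rest.takeWhile pvIsDig)) ++ pvGoB (rest.dropWhile pvIsDig)
    else pvGoB rest
termination_by l => l.length
decreasing_by
  · exact Nat.lt_succ_of_le (List.length_dropWhile_le _ _)
  · exact Nat.lt_succ_self _

def adjacentTimes_alt (s : String) : String := String.mk (pvGoB s.toList)

-- ===== PRECONDITION & SPEC =====
def Spec_adjacentTimes (s : String) (out : String) : Prop := out = adjacentTimes_alt s
instance (s : String) (out : String) : Decidable (Spec_adjacentTimes s out) := by unfold Spec_adjacentTimes; infer_instance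

-- ===== CLAIM (what is proved, stated in full; the proofs are below) =====
def Claim_equal_adjacentTimes : Prop := ∀ (s : String), Dom_adjacentTimes s → Spec_adjacentTimes s (adjacentTimes s)

-- ===== LEMMAS AND PROOFS =====

theorem pvStrTimes_nil_val : ∀ (c : List Char), pvStrTimes c (pvDigVal []) = [] := by
  intro c; simp [pvDigVal, pvStrTimes]

theorem pvParseA_spec : ∀ (l : List Char) (n : Int),
    pvParseA l n = ((l.takeWhile pvIsDig).foldl (fun a d => a * 10 + ((d.toNat : Int) - 48)) n,
                    l.dropWhile pvIsDig) := by
  intro l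
  induction l with
  | nil => intro n; simp [pvParseA]
  | cons ch rest ih =>
    intro n
    by_cases h : 48 ≤ ch.toNat ∧ ch.toNat ≤ 57
    · have hd : pvIsDig ch = true := by simp [pvIsDig, h.1, h.2]
      simp [pvParseA, h, ih, hd]
    · have hd : pvIsDig ch = false := by simp [pvIsDig]; omega
      simp [pvParseA, h, hd]

theorem pv_take_drop : ∀ (l : List Char),
    (l.dropWhile pvIsDig).takeWhile pvIsDig = [] ∧
    (l.dropWhile pvIsDig).dropWhile pvIsDig = l.dropWhile pvIsDig := by
  intro l
  induction l with
  | nil => simp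
  | cons ch rest ih =>
    by_cases hd : pvIsDig ch = true
    · simpa [List.dropWhile_cons, hd] using ih
    · simp only [Bool.not_eq_true] at hd
      simp [List.dropWhile_cons, hd]

-- digits at the front of the stream never start a regex match: B skips them
theorem pvGoB_drop : ∀ (l : List Char), pvGoB (l.dropWhile pvIsDig) = pvGoB l := by
  intro l
  induction l with
  | nil => simp
  | cons ch rest ih =>
    by_cases hd : pvIsDig ch = true
    · have h1 : pvGoB (ch :: rest) = pvGoB rest := by simp [pvGoB, hd]
      have h2 : List.dropWhile pvIsDig (ch :: rest) = List.dropWhile pvIsDig rest := by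
        simp [List.dropWhile_cons, hd]
      rw [h2, ih, h1]
    · simp only [Bool.not_eq_true] at hd
      simp [hd]

theorem pv_key : ∀ (k : Nat) (l : List Char), l.length ≤ k → ∀ (c op : List Char),
    pvLoopA l c op = op ++ pvStrTimes c (pvDigVal (l.takeWhile pvIsDig)) ++ pvGoB (l.dropWhile pvIsDig) := by
  intro k
  induction k with
  | zero =>
    intro l hl c op
    have : l = [] := List.length_eq_zero_iff.mp (Nat.le_zero.mp hl)
    subst this
    simp [pvLoopA, pvGoB, pvDigVal, pvStrTimes]
  | succ k ih =>
    intro l hl c op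
    match l with
    | [] => simp [pvLoopA, pvGoB, pvDigVal, pvStrTimes]
    | ch :: rest =>
      by_cases h : ch.toNat < 48 ∨ 57 < ch.toNat
      · -- non-digit character: A stores it in c; B looks at what follows
        have hd : pvIsDig ch = false := by simp [pvIsDig]; omega
        have hrest : rest.length ≤ k := by simpa using hl
        have hA : pvLoopA (ch :: rest) c op = pvLoopA rest [ch] op := by
          simp [pvLoopA, h]
        have ht : List.takeWhile pvIsDig (ch :: rest) = [] := by
          simp [hd]
        have hdw : List.dropWhile pvIsDig (ch :: rest) = ch :: rest := by
          simp [hd]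
        rw [hA, ih rest hrest [ch] op, ht, hdw, pvStrTimes_nil_val]
        match rest with
        | [] => simp [pvGoB, pvStrTimes_nil_val]
        | b :: rest2 =>
          by_cases hb : pvIsDig b = true
          · have hB : pvGoB (ch :: b :: rest2)
                = pvStrTimes [ch] (pvDigVal ((b :: rest2).takeWhile pvIsDig))
                  ++ pvGoB ((b :: rest2).dropWhile pvIsDig) := by
              simp [pvGoB, hd, hb]
            rw [hB]; simp [List.append_assoc]
          · simp only [Bool.not_eq_true] at hb
            have hB : pvGoB (ch :: b :: rest2) = pvGoB (b :: rest2) := by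
              simp [pvGoB, hd, hb]
            rw [hB]
            simp [hb, pvStrTimes_nil_val]
      · -- digit character: A consumes the whole run via pvParseA
        have hd : pvIsDig ch = true := by simp [pvIsDig]; omega
        have hA : pvLoopA (ch :: rest) c op
            = pvLoopA (pvParseA rest ((ch.toNat : Int) - 48)).2 c
                (op ++ pvStrTimes c (pvParseA rest ((ch.toNat : Int) - 48)).1) := by
          simp [pvLoopA, h]
        have hlen : (rest.dropWhile pvIsDig).length ≤ k := by
          have := List.length_dropWhile_le pvIsDig rest
          simp at hl; omega
        obtain ⟨h1, h2⟩ := pv_take_drop rest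
        rw [hA, pvParseA_spec, ih _ hlen, h1, h2, pvStrTimes_nil_val]
        have ht : List.takeWhile pvIsDig (ch :: rest) = ch :: List.takeWhile pvIsDig rest := by
          simp [hd]
        have hdw : List.dropWhile pvIsDig (ch :: rest) = List.dropWhile pvIsDig rest := by
          simp [hd]
        have hz : (0 : Int) * 10 + ((ch.toNat : Int) - 48) = (ch.toNat : Int) - 48 := by ring
        have hv : pvDigVal (ch :: List.takeWhile pvIsDig rest)
            = (List.takeWhile pvIsDig rest).foldl (fun a d => a * 10 + ((d.toNat : Int) - 48))
                ((ch.toNat : Int) - 48) := by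
          rw [pvDigVal, List.foldl_cons, hz]
        rw [ht, hdw, hv]
        simp [List.append_assoc]

-- ===== VERDICT (by name: the statement is the Claim_ definition above) =====
theorem adjacentTimes_spec : Claim_equal_adjacentTimes := by
  intro s _
  unfold Spec_adjacentTimes adjacentTimes adjacentTimes_alt
  rw [pv_key s.toList.length s.toList le_rfl [] [], pvGoB_drop]
  simp [pvStrTimes]
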